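-- pv_equiv track=rewrite | github.com/henry-25/advent_of_code_2018 | day_5/polymer.py | reduce_string_without_unit
-- ===== SOURCE A (Python) =====
-- def reduce_string_without_unit(unit, input_string):
--     k = 0
--     tmp_string = input_string.replace(unit[0], '').replace(unit[1], '')
--     while k < len(tmp_string) - 1:
--         if(tmp_string[k] == tmp_string[k+1].swapcase()):
--             tmp_string = tmp_string[:k] + tmp_string[k+2:]
--             k = 0
--         else:
--             k += 1
--     return(tmp_string, len(tmp_string))
-- ===== SOURCE B (Python) =====
-- def reduce_string_without_unit(unit, input_string):
--     tmp = input_string.replace(unit[0], '').replace(unit[1], '')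
--     stack = []
--     for c in tmp:
--         if stack and stack[-1] == c.swapcase():
--             stack.pop()
--         else:
--             stack.append(c)
--     result = ''.join(stack)
--     return (result, len(result))
-- ===== Notes on version B (the rewrite author's own statement) =====
-- stated objective: faster
-- what changed: Replaced A's while-loop that removes one cancelling adjacent pair and restarts scanning from index 0 with a single left-to-right pass maintaining a stack (push a char, pop when it cancels with the top).
import Mathlib
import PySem

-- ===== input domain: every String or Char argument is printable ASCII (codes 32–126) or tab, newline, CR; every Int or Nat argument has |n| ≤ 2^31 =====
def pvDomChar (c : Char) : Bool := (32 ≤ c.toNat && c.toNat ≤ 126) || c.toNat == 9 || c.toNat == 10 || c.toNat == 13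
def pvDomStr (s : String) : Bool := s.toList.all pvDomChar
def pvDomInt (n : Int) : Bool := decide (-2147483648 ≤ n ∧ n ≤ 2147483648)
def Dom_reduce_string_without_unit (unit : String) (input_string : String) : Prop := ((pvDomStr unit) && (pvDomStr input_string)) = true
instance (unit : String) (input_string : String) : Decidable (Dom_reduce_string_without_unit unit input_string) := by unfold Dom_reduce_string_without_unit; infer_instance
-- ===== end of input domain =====

-- B replaces A's restart-from-0 pair-removal loop (quadratic) by a single-pass stack reduction; return values proved equal whenever the unit has at least 2 characters (A raises IndexError otherwise).

-- ===== PORT A =====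

-- Python's 1-char-string .swapcase(), exact on the ASCII domain (via PySem's ASCII case primitives); shared by both ports
def pvSwap (c : Char) : Char :=
  if PySem.Chars.islower c then PySem.Chars.upperChar c else PySem.Chars.lowerChar c

-- the while loop of A: k counts up, resets to 0 after each pair removal (Python's k is always ≥ 0, so Nat)
def pvLoopA (l : List Char) (k : Nat) : List Char :=
  if h : k + 1 < l.length then
    if l[k] = pvSwap l[k + 1] then
      pvLoopA (l.take k ++ l.drop (k + 2)) 0
    else
      pvLoopA l (k + 1)
  else l
termination_by (l.length, l.length - k)
decreasing_by
  · left
    have hk : k ≤ l.length := by omega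
    simp [List.length_take, List.length_drop]
    omega
  · exact Prod.Lex.right _ (by omega)

def reduce_string_without_unit (unit : String) (input_string : String) : String × Int :=
  match PySem.Str.pyGet? unit 0, PySem.Str.pyGet? unit 1 with
  | some c0, some c1 =>
    let tmp := PySem.Str.replace (PySem.Str.replace input_string (String.ofList [c0]) "") (String.ofList [c1]) ""
    let r := pvLoopA tmp.toList 0
    (String.ofList r, (PySem.Str.len (String.ofList r) : Int))
  | _, _ => ("", 0)  -- unreachable under Pre_ (unit[0] / unit[1] raise IndexError)

-- ===== PORT B =====

-- one step of B's for-loop: pop when the stack top is the swapcase of c, else push (top of stack = list head)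
def pvStepB (stk : List Char) (c : Char) : List Char :=
  match stk with
  | t :: rest => if t = pvSwap c then rest else c :: t :: rest
  | [] => [c]

def reduce_string_without_unit_alt (unit : String) (input_string : String) : String × Int :=
  match PySem.Str.pyGet? unit 0 with
  | none => ("", 0)  -- unreachable under Pre_ (unit[0] raises IndexError)
  | some c0 =>
    match PySem.Str.pyGet? unit 1 with
    | none => ("", 0)  -- unreachable under Pre_ (unit[1] raises IndexError)
    | some c1 =>
      let tmp := PySem.Str.replace (PySem.Str.replace input_string (String.ofList [c0]) "") (String.ofList [c1]) ""
      let stk := tmp.toList.foldl pvStepB []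
      let r := stk.reverse
      (String.ofList r, (PySem.Str.len (String.ofList r) : Int))

-- ===== PRECONDITION & SPEC =====
-- A (and B alike) evaluate unit[0] and unit[1]: both raise IndexError when the unit has fewer than 2 characters, so exactly those inputs are excluded.
def Pre_reduce_string_without_unit (unit : String) (input_string : String) : Prop :=
  2 ≤ unit.toList.length
instance (unit : String) (input_string : String) : Decidable (Pre_reduce_string_without_unit unit input_string) := by unfold Pre_reduce_string_without_unit; infer_instance

def pvWitness_reduce_string_without_unit : String × String := ("aA", "dabAcCaCBAcCcaDA")

def Spec_reduce_string_without_unit (unit : String) (input_string : String) (out : String × Int) : Prop := out = reduce_string_without_unit_alt unit input_string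
instance (unit : String) (input_string : String) (out : String × Int) : Decidable (Spec_reduce_string_without_unit unit input_string out) := by unfold Spec_reduce_string_without_unit; infer_instance

-- ===== CLAIM (what is proved, stated in full; the proofs are below) =====
def Claim_equal_reduce_string_without_unit : Prop := ∀ (unit : String) (input_string : String), Dom_reduce_string_without_unit unit input_string → Pre_reduce_string_without_unit unit input_string → Spec_reduce_string_without_unit unit input_string (reduce_string_without_unit unit input_string)

-- ===== LEMMAS AND PROOFS =====

theorem char_le_iff (a b : Char) : (a ≤ b) ↔ a.toNat ≤ b.toNat := by
  rw [Char.le_def, UInt32.le_iff_toNat_le]; rfl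

theorem char_eq_of_toNat (a b : Char) (h : a.toNat = b.toNat) : a = b := by
  have := congrArg Char.ofNat h
  rwa [Char.ofNat_toNat, Char.ofNat_toNat] at this

theorem toNat_ofNat_small (n : Nat) (h : n < 1000) : (Char.ofNat n).toNat = n := by
  rw [Char.toNat_ofNat, if_pos]; exact Or.inl (by omega)

theorem islower_iff (c : Char) : PySem.Chars.islower c = true ↔ 97 ≤ c.toNat ∧ c.toNat ≤ 122 := by
  simp [PySem.Chars.islower, char_le_iff]

theorem isupper_iff (c : Char) : PySem.Chars.isupper c = true ↔ 65 ≤ c.toNat ∧ c.toNat ≤ 90 := by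
  simp [PySem.Chars.isupper, char_le_iff]

theorem pvSwap_lower (c : Char) (hl : PySem.Chars.islower c = true) :
    pvSwap c = Char.ofNat (c.toNat - 32) := by
  simp only [pvSwap, hl, if_pos, PySem.Chars.upperChar]

theorem pvSwap_upper (c : Char) (hl : PySem.Chars.islower c = false)
    (hu : PySem.Chars.isupper c = true) : pvSwap c = Char.ofNat (c.toNat + 32) := by
  simp only [pvSwap, hl, PySem.Chars.lowerChar, hu, if_true, Bool.false_eq_true, if_false]

theorem pvSwap_other (c : Char) (hl : PySem.Chars.islower c = false)
    (hu : PySem.Chars.isupper c = false) : pvSwap c = c := by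
  simp only [pvSwap, hl, PySem.Chars.lowerChar, hu, Bool.false_eq_true, if_false]

-- Python's swapcase (on ASCII) is an involution
theorem pvSwap_invol (c : Char) : pvSwap (pvSwap c) = c := by
  by_cases hl : PySem.Chars.islower c = true
  · have hb := (islower_iff c).mp hl
    have h1 : (pvSwap c).toNat = c.toNat - 32 := by
      rw [pvSwap_lower c hl, toNat_ofNat_small _ (by omega)]
    have hl2 : PySem.Chars.islower (pvSwap c) = false := by
      rw [Bool.eq_false_iff, Ne, islower_iff]; omega
    have hu2 : PySem.Chars.isupper (pvSwap c) = true := by rw [isupper_iff]; omega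
    apply char_eq_of_toNat
    rw [pvSwap_upper _ hl2 hu2, toNat_ofNat_small _ (by omega), h1]
    omega
  · rw [Bool.not_eq_true] at hl
    by_cases hu : PySem.Chars.isupper c = true
    · have hb := (isupper_iff c).mp hu
      have h1 : (pvSwap c).toNat = c.toNat + 32 := by
        rw [pvSwap_upper c hl hu, toNat_ofNat_small _ (by omega)]
      have hl2 : PySem.Chars.islower (pvSwap c) = true := by rw [islower_iff]; omega
      apply char_eq_of_toNat
      rw [pvSwap_lower _ hl2, toNat_ofNat_small _ (by omega), h1]
      omega
    · rw [Bool.not_eq_true] at hu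
      rw [pvSwap_other c hl hu, pvSwap_other c hl hu]

-- invariant of B's stack: no adjacent pair of the stack itself would cancel (top at the head)
def pvInv (stk : List Char) : Prop := List.IsChain (fun a b => b ≠ pvSwap a) stk

theorem pvInv_step (stk : List Char) (c : Char) (h : pvInv stk) : pvInv (pvStepB stk c) := by
  unfold pvInv at *
  match stk with
  | [] => simp [pvStepB]
  | t :: rest =>
    by_cases htc : t = pvSwap c
    · simp only [pvStepB, if_pos htc]
      exact h.tail
    · simp only [pvStepB, if_neg htc]
      exact List.isChain_cons_cons.mpr ⟨fun h' => htc h', h⟩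

-- removing an adjacent cancelling pair at the FRONT does not change B's fold
theorem pvCancel_cons (a b : Char) (t stk : List Char) (hab : a = pvSwap b) (h : pvInv stk) :
    List.foldl pvStepB stk (a :: b :: t) = List.foldl pvStepB stk t := by
  have hba : b = pvSwap a := by rw [hab, pvSwap_invol]
  match stk with
  | [] => simp [pvStepB, hab]
  | v :: r =>
    by_cases hv : v = pvSwap a
    · have hvb : v = b := by rw [hv, ← hba]
      simp only [List.foldl, pvStepB, if_pos hv]
      match r with
      | [] => simp [pvStepB, hvb]
      | u :: us =>
        have hub : ¬ u = pvSwap b := by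
          have := (List.isChain_cons_cons.mp h).1
          rw [hvb] at this; exact fun h' => this h'
        simp [pvStepB, hub, hvb]
    · have h1 : pvStepB (v :: r) a = a :: v :: r := by simp [pvStepB, hv]
      have h2 : pvStepB (a :: v :: r) b = v :: r := by simp [pvStepB, if_pos hab]
      rw [List.foldl_cons, List.foldl_cons, h1, h2]

-- removing an adjacent cancelling pair ANYWHERE does not change B's fold
theorem pvCancel (a b : Char) (suf : List Char) (hab : a = pvSwap b) :
    ∀ (pre : List Char) (stk : List Char), pvInv stk →
      List.foldl pvStepB stk (pre ++ a :: b :: suf) = List.foldl pvStepB stk (pre ++ suf) := by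
  intro pre
  induction pre with
  | nil => exact fun stk h => pvCancel_cons a b suf stk hab h
  | cons x xs ih =>
    intro stk h
    simp only [List.cons_append, List.foldl_cons]
    exact ih (pvStepB stk x) (pvInv_step stk x h)

-- on a string with no adjacent cancelling pair, B's fold only pushes
theorem pvNoRed (l : List Char) : ∀ (stk : List Char),
    List.IsChain (fun x y => x ≠ pvSwap y) (stk.take 1 ++ l) →
    List.foldl pvStepB stk l = l.reverse ++ stk := by
  induction l with
  | nil => intro stk _; simp
  | cons c t ih =>
    intro stk hch
    match stk with
    | [] =>
      simp only [List.foldl_cons, pvStepB]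
      rw [ih [c] (by simpa using hch)]
      simp
    | v :: r =>
      rw [show (v :: r).take 1 ++ c :: t = v :: c :: t by simp [List.take_succ_cons]] at hch
      have hch' := List.isChain_cons_cons.mp hch
      simp only [List.foldl_cons, pvStepB, if_neg hch'.1]
      rw [ih (c :: v :: r) (by simpa [List.take_succ_cons] using hch'.2)]
      simp

-- each removal A performs preserves the value of B's fold
theorem pvLoopA_red (l : List Char) (k : Nat) :
    List.foldl pvStepB [] (pvLoopA l k) = List.foldl pvStepB [] l := by
  fun_induction pvLoopA with
  | case1 l k h hif ih =>
    rw [ih]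
    have hsplit : l = l.take k ++ l[k] :: l[k + 1] :: l.drop (k + 2) := by
      conv_lhs => rw [← List.take_append_drop k l]
      congr 1
      rw [List.drop_eq_getElem_cons (by omega), List.drop_eq_getElem_cons (by omega)]
    conv_rhs => rw [hsplit]
    exact (pvCancel _ _ _ hif _ [] (by simp [pvInv])).symm
  | case2 l k h hif ih => exact ih
  | case3 l k h => rfl

-- A's loop ends with no adjacent cancelling pair left
theorem pvLoopA_chain (l : List Char) (k : Nat)
    (hk : ∀ i, (h : i + 1 < l.length) → i < k → l[i] ≠ pvSwap l[i + 1]) :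
    List.IsChain (fun x y => x ≠ pvSwap y) (pvLoopA l k) := by
  fun_induction pvLoopA with
  | case1 l k h hif ih => exact ih (by intro i hi hik; omega)
  | case2 l k h hif ih =>
    apply ih
    intro i hi hik
    by_cases hik' : i < k
    · exact hk i hi hik'
    · have : i = k := by omega
      subst this; exact hif
  | case3 l k h =>
    rw [List.isChain_iff_getElem]
    intro i hi
    exact hk i hi (by omega)

-- A's quadratic loop computes exactly B's single-pass stack reduction
theorem pvMain (l : List Char) : pvLoopA l 0 = (List.foldl pvStepB [] l).reverse := by
  have h1 := pvLoopA_red l 0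
  have h2 := pvLoopA_chain l 0 (by intro i hi hik; omega)
  have h3 := pvNoRed (pvLoopA l 0) [] (by simpa using h2)
  rw [← h1, h3]
  simp

-- ===== VERDICT (by name: the statement is the Claim_ definition above) =====
theorem reduce_string_without_unit_spec : Claim_equal_reduce_string_without_unit := by
  intro unit input_string _ hpre
  unfold Pre_reduce_string_without_unit at hpre
  unfold Spec_reduce_string_without_unit reduce_string_without_unit reduce_string_without_unit_alt
  have h0 : PySem.Str.pyGet? unit 0 = some (unit.toList[0]'(by omega)) := by
    rw [show (0 : Int) = ((0 : Nat) : Int) by norm_num, PySem.Str.pyGet?_natCast]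
    exact List.getElem?_eq_getElem _
  have h1 : PySem.Str.pyGet? unit 1 = some (unit.toList[1]'(by omega)) := by
    rw [show (1 : Int) = ((1 : Nat) : Int) by norm_num, PySem.Str.pyGet?_natCast]
    exact List.getElem?_eq_getElem _
  rw [h0, h1]
  simp only [pvMain]
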